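-- pv_equiv track=rewrite | github.com/stevenminhhoang/LeetCode | reverse_string_k.py | reverse_string_II
-- ===== SOURCE A (Python) =====
-- def reverse_string_II(s, k):
--     n = len(s)
--     s = list(s)
--     mod = n%(2*k)
--     if n <= k:
--         return ''.join(s[::-1])
--
--     for i in range(0,n-mod,2*k):
--         s[i:i+k] = s[i:i+k][::-1]
--
--     if mod < k and mod > 0:
--         s[n-mod:] = s[n-mod:][::-1]
--
--     if mod >= k and mod < 2 * k:
--         s[n-mod:n-mod+k] = s[n-mod:n-mod+k][::-1]
--
--     return ''.join(s)
-- ===== SOURCE B (Python) =====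
-- def reverse_string_II(s, k):
--     # Closed-form index map: output char j comes from position
--     # i + min(k, n-i) - 1 - r (i = block start, r = offset) if r < k, else j.
--     # No list mutation, no slicing, no reversal.
--     n = len(s)
--     t = 2 * k
--     out = []
--     for j in range(n):
--         r = j % t
--         if r < k:
--             i = j - r
--             out.append(s[i + min(k, n - i) - 1 - r])
--         else:
--             out.append(s[j])
--     return ''.join(out)
-- ===== Notes on version B (the rewrite author's own statement) =====
-- stated objective: alternative
-- what changed: A mutates a char list with slice-reversal assignments, mod arithmetic and three special-case branches; B never reverses or slices anything: it computes, for each output position j, the closed-form source index i+min(k,n-i)-1-r of the character that lands there and builds the output by a single indexed read per position.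
-- outside the precondition, e.g. on reverse_string_II('abc', -2): A returns 'abc', B raises IndexError; on reverse_string_II('abc', 0): A raises ZeroDivisionError, B raises ZeroDivisionError
import Mathlib
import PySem

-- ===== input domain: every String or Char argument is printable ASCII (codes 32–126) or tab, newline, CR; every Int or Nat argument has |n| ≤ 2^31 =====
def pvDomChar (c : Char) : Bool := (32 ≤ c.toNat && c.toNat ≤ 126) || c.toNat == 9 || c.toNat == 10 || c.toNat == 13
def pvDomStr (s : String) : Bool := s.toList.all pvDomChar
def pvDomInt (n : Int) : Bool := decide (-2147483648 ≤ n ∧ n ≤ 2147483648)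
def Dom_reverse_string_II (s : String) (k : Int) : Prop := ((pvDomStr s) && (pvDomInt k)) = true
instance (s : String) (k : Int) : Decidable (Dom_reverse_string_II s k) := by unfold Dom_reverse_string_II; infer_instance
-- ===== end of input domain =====

-- B replaces A's in-place slice-reversal passes by a closed-form index map: each output
-- position reads its source character directly, with no reversal, slicing or mutation
-- (objective: alternative).

-- ===== PORT A =====
def reverse_string_II (s : String) (k : Int) : String :=
  let n : Int := PySem.Str.len s
  let l : List Char := s.toList
  let md : Int := PySem.Int.mod n (2 * k)
  if n ≤ k then
    -- ''.join(s[::-1]); s[::-1] is reverse (PySem.List.slice?_none_none_neg_one)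
    String.mk l.reverse
  else
    let l1 := (PySem.List.pyRange 0 (n - md) (2 * k)).foldl
      (fun t i =>
        -- s[i:i+k] = s[i:i+k][::-1]  as  s[:i] ++ reverse s[i:i+k] ++ s[i+k:]
        PySem.List.slice t (some 0) (some i)
          ++ (PySem.List.slice t (some i) (some (i + k))).reverse
          ++ PySem.List.slice t (some (i + k)) none) l
    let l2 := if md < k ∧ 0 < md then
        PySem.List.slice l1 (some 0) (some (n - md))
          ++ (PySem.List.slice l1 (some (n - md)) none).reverse
      else l1
    let l3 := if k ≤ md ∧ md < 2 * k then
        PySem.List.slice l2 (some 0) (some (n - md))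
          ++ (PySem.List.slice l2 (some (n - md)) (some (n - md + k))).reverse
          ++ PySem.List.slice l2 (some (n - md + k)) none
      else l2
    String.mk l3

-- ===== PORT B =====
-- s[idx] is ported with pyGetD (total indexing form); under Pre_ (k ≥ 1) the computed
-- source index is always in range (the proofs below never use the default).
def reverse_string_II_alt (s : String) (k : Int) : String :=
  let n : Int := PySem.Str.len s
  let l : List Char := s.toList
  let t : Int := 2 * k
  let out : List Char := (PySem.List.pyRange 0 n 1).foldl
    (fun out j =>
      let r := PySem.Int.mod j t
      if r < k then
        let i := j - r
        out ++ [PySem.List.pyGetD l (i + min k (n - i) - 1 - r) ' ']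
      else
        out ++ [PySem.List.pyGetD l j ' ']) []
  String.mk out

-- ===== PRECONDITION & SPEC =====
-- Pre_ excludes k ≤ 0, outside the task's natural domain (LeetCode guarantees k ≥ 1):
-- at k = 0 A raises ZeroDivisionError; for k < 0 A returns s unchanged while B's index
-- map can raise IndexError.
def Pre_reverse_string_II (s : String) (k : Int) : Prop := 1 ≤ k
instance (s : String) (k : Int) : Decidable (Pre_reverse_string_II s k) := by unfold Pre_reverse_string_II; infer_instance
def pvWitness_reverse_string_II : String × Int := ("abcdefgh", 3)
def Spec_reverse_string_II (s : String) (k : Int) (out : String) : Prop := out = reverse_string_II_alt s k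
instance (s : String) (k : Int) (out : String) : Decidable (Spec_reverse_string_II s k out) := by unfold Spec_reverse_string_II; infer_instance

-- ===== CLAIM (what is proved, stated in full; the proofs are below) =====
def Claim_equal_reverse_string_II : Prop := ∀ (s : String) (k : Int), Dom_reverse_string_II s k → Pre_reverse_string_II s k → Spec_reverse_string_II s k (reverse_string_II s k)

-- ===== LEMMAS AND PROOFS =====

-- common form both programs compute: q full 2k-blocks, then the (short) tail block
def blocks (k : Nat) : Nat → List Char → List Char
  | 0, l => (l.take k).reverse ++ l.drop k
  | q+1, l => (l.take k).reverse ++ (l.drop k).take k ++ blocks k q (l.drop (2*k))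

-- what A's loop alone computes: q full blocks, tail untouched
def fullBlocks (k : Nat) : Nat → List Char → List Char
  | 0, l => l
  | q+1, l => (l.take k).reverse ++ (l.drop k).take k ++ fullBlocks k q (l.drop (2*k))

-- B's closed-form source index, at the Nat level
def bchar (kn : Nat) (l : List Char) (j : Nat) : Char :=
  let r := j % (2 * kn)
  if r < kn then
    let i := j - r
    l.getD (i + min kn (l.length - i) - 1 - r) ' '
  else
    l.getD j ' '

lemma pyRange_pos_nil (a b s : Int) (hs : 0 < s) (h : b ≤ a) :
    PySem.List.pyRange a b s = [] := by
  rw [PySem.List.pyRange_of_pos a b hs]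
  simp [show ¬ a < b by omega]

lemma pyRange_pos_cons (a b s : Int) (hs : 0 < s) (h : a < b) :
    PySem.List.pyRange a b s = a :: PySem.List.pyRange (a + s) b s := by
  rw [PySem.List.pyRange_of_pos a b hs, PySem.List.pyRange_of_pos (a + s) b hs]
  have key : (b - a + s - 1) / s = (b - (a + s) + s - 1) / s + 1 := by
    have he : b - a + s - 1 = (b - (a + s) + s - 1) + 1 * s := by ring
    rw [he, Int.add_mul_ediv_right _ _ (by omega)]
  by_cases h2 : a + s < b
  · have hnn : 0 ≤ (b - (a + s) + s - 1) / s := Int.ediv_nonneg (by omega) (by omega)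
    rw [if_pos h, if_pos h2, key,
      show ((b - (a + s) + s - 1) / s + 1).toNat = ((b - (a + s) + s - 1) / s).toNat + 1 by omega,
      List.range_succ_eq_map]
    simp only [List.map_cons, List.map_map, Nat.cast_zero, mul_zero, add_zero]
    refine congrArg (a :: ·) (List.map_congr_left fun x _ => ?_)
    simp [Function.comp]
    push_cast
    ring
  · have hz : (b - (a + s) + s - 1) / s = 0 :=
      Int.ediv_eq_zero_of_lt (by omega) (by omega)
    rw [if_pos h, if_neg h2, key, hz]
    simp

lemma fullBlocks_length (kn : Nat) : ∀ (q : Nat) (l : List Char),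
    (fullBlocks kn q l).length = l.length := by
  intro q
  induction q with
  | zero => intro l; simp [fullBlocks]
  | succ q ih =>
    intro l
    simp [fullBlocks, ih]
    omega

lemma fix_fullBlocks (kn : Nat) : ∀ (q : Nat) (l : List Char), 2 * kn * q ≤ l.length →
    (fullBlocks kn q l).take (2 * kn * q)
      ++ (((fullBlocks kn q l).drop (2 * kn * q)).take kn).reverse
      ++ ((fullBlocks kn q l).drop (2 * kn * q)).drop kn
    = blocks kn q l := by
  intro q
  induction q with
  | zero => intro l _; simp [fullBlocks, blocks]
  | succ q ih =>
    intro l hl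
    have hql : 2 * kn * (q + 1) = 2 * kn * q + 2 * kn := by ring
    have hfb : fullBlocks kn (q + 1) l
        = ((l.take kn).reverse ++ (l.drop kn).take kn) ++ fullBlocks kn q (l.drop (2 * kn)) := by
      simp [fullBlocks, List.append_assoc]
    have hbl : blocks kn (q + 1) l
        = ((l.take kn).reverse ++ (l.drop kn).take kn) ++ blocks kn q (l.drop (2 * kn)) := by
      simp [blocks, List.append_assoc]
    have hclen : ((l.take kn).reverse ++ (l.drop kn).take kn).length = 2 * kn := by
      simp
      omega
    have ihl : 2 * kn * q ≤ (l.drop (2 * kn)).length := by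
      simp
      omega
    have e_take : (((l.take kn).reverse ++ (l.drop kn).take kn) ++ fullBlocks kn q (l.drop (2 * kn))).take (2 * kn * (q + 1))
        = ((l.take kn).reverse ++ (l.drop kn).take kn) ++ (fullBlocks kn q (l.drop (2 * kn))).take (2 * kn * q) := by
      rw [List.take_append, hclen, List.take_of_length_le (le_of_eq_of_le hclen (by omega))]
      congr 2
      omega
    have e_drop : (((l.take kn).reverse ++ (l.drop kn).take kn) ++ fullBlocks kn q (l.drop (2 * kn))).drop (2 * kn * (q + 1))
        = (fullBlocks kn q (l.drop (2 * kn))).drop (2 * kn * q) := by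
      rw [List.drop_append, hclen, List.drop_eq_nil_of_le (le_of_eq_of_le hclen (by omega))]
      simp only [List.nil_append]
      congr 1
      omega
    rw [hfb, hbl, e_take, e_drop, ← ih (l.drop (2 * kn)) ihl]
    simp [List.append_assoc]

lemma A_loop (kn : Nat) (hk : 1 ≤ kn) : ∀ (q a : Nat) (P rest : List Char),
    P.length = a → 2 * kn * q ≤ rest.length →
    ((PySem.List.pyRange (a : Int) ((a : Int) + 2 * (kn : Int) * (q : Int)) (2 * (kn : Int))).foldl
      (fun t i =>
        PySem.List.slice t (some 0) (some i)
          ++ (PySem.List.slice t (some i) (some (i + (kn : Int)))).reverse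
          ++ PySem.List.slice t (some (i + (kn : Int))) none) (P ++ rest))
    = P ++ fullBlocks kn q rest := by
  intro q
  induction q with
  | zero =>
    intro a P rest hP _
    rw [pyRange_pos_nil _ _ _ (by positivity) (by simp)]
    simp [fullBlocks]
  | succ q ih =>
    intro a P rest hP hlen
    have hql : 2 * kn * (q + 1) = 2 * kn * q + 2 * kn := by ring
    have hstep : (0 : Int) < 2 * (kn : Int) := by positivity
    rw [pyRange_pos_cons _ _ _ hstep (by
      have hkpos : (0 : Int) < (kn : Int) := by exact_mod_cast hk
      push_cast
      nlinarith)]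
    simp only [List.foldl_cons]
    have e1 : PySem.List.slice (P ++ rest) (some 0) (some (a : Int)) = P := by
      rw [PySem.List.slice_zero_start, PySem.List.slice_to_natCast, ← hP, List.take_left]
    have e2 : PySem.List.slice (P ++ rest) (some (a : Int)) (some ((a : Int) + (kn : Int))) = rest.take kn := by
      rw [PySem.List.slice_natCast_add, ← hP, List.drop_left]
    have e3 : PySem.List.slice (P ++ rest) (some ((a : Int) + (kn : Int))) none = rest.drop kn := by
      rw [show (a : Int) + (kn : Int) = ((a + kn : Nat) : Int) by push_cast; ring,
        PySem.List.slice_from_natCast, ← hP]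
      simp
    rw [e1, e2, e3]
    have hdd : rest.drop (2 * kn) = (rest.drop kn).drop kn := by
      rw [List.drop_drop]
      congr 1
      ring
    have hrest : (rest.drop kn).take kn ++ rest.drop (2 * kn) = rest.drop kn := by
      rw [hdd, List.take_append_drop]
    have hre : P ++ (rest.take kn).reverse ++ rest.drop kn
        = (P ++ (rest.take kn).reverse ++ (rest.drop kn).take kn) ++ rest.drop (2 * kn) := by
      conv_lhs => rw [← hrest]
      simp [List.append_assoc]
    have hP' : (P ++ (rest.take kn).reverse ++ (rest.drop kn).take kn).length = a + 2 * kn := by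
      simp [hP]
      omega
    have hlen' : 2 * kn * q ≤ (rest.drop (2 * kn)).length := by
      simp
      omega
    have ihh := ih (a + 2 * kn) _ _ hP' hlen'
    rw [hre,
      show (a : Int) + 2 * (kn : Int) = ((a + 2 * kn : Nat) : Int) by push_cast; ring,
      show (a : Int) + 2 * (kn : Int) * (((q : Nat) + 1 : Nat) : Int) = ((a + 2 * kn : Nat) : Int) + 2 * (kn : Int) * (q : Int) by push_cast; ring,
      ihh]
    simp [fullBlocks, List.append_assoc]

-- A computes blocks kn (N / (2kn)) l  (N = length, kn = k)
lemma A_eq_blocks (s : String) (kn : Nat) (hk : 1 ≤ kn) :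
    reverse_string_II s (kn : Int)
      = String.mk (blocks kn (s.toList.length / (2 * kn)) s.toList) := by
  set l := s.toList with hl
  set N := l.length with hN
  set M := N % (2 * kn) with hM
  set q := N / (2 * kn) with hq
  have hMlt : M < 2 * kn := Nat.mod_lt _ (by omega)
  have hNsum : 2 * kn * q + M = N := Nat.div_add_mod N (2 * kn)
  have hlen : PySem.Str.len s = (N : Int) := by
    simp [PySem.Str.len_eq, hN, hl]
  have hmod : PySem.Int.mod ((N : Nat) : Int) (2 * (kn : Int)) = (M : Int) := by
    rw [show (2 : Int) * (kn : Int) = ((2 * kn : Nat) : Int) by push_cast; ring,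
      PySem.Int.mod_natCast]
  unfold reverse_string_II
  dsimp only
  rw [hlen, ← hl, hmod]
  by_cases hnk : (N : Int) ≤ (kn : Int)
  · -- n <= k: full reversal; blocks has q = 0 and the tail branch reverses everything
    rw [if_pos hnk]
    have hq0 : q = 0 := Nat.div_eq_of_lt (by omega)
    rw [hq0]
    simp only [blocks]
    rw [List.take_of_length_le (by omega), List.drop_eq_nil_of_le (by omega)]
    simp
  · rw [if_neg hnk]
    have hkN : kn < N := by omega
    have hstop : (N : Int) - (M : Int) = (0 : Int) + 2 * (kn : Int) * (q : Int) := by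
      rw [← hNsum]
      push_cast
      ring
    have hloop := A_loop kn hk q 0 [] l rfl (by omega)
    rw [Nat.cast_zero] at hloop
    simp only [List.nil_append] at hloop
    rw [hstop, hloop]
    set t := fullBlocks kn q l with ht
    have htlen : t.length = N := by rw [ht, fullBlocks_length]
    have hfix := fix_fullBlocks kn q l (by omega)
    rw [← ht] at hfix
    have hE : (0 : Int) + 2 * (kn : Int) * (q : Int) = ((2 * kn * q : Nat) : Int) := by
      push_cast
      ring
    have s1 : PySem.List.slice t (some 0) (some ((0 : Int) + 2 * (kn : Int) * (q : Int))) = t.take (2 * kn * q) := by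
      rw [hE, PySem.List.slice_zero_start, PySem.List.slice_to_natCast]
    have s2 : PySem.List.slice t (some ((0 : Int) + 2 * (kn : Int) * (q : Int))) none = t.drop (2 * kn * q) := by
      rw [hE, PySem.List.slice_from_natCast]
    have s3 : PySem.List.slice t (some ((0 : Int) + 2 * (kn : Int) * (q : Int))) (some ((0 : Int) + 2 * (kn : Int) * (q : Int) + (kn : Int)))
        = (t.drop (2 * kn * q)).take kn := by
      rw [hE, PySem.List.slice_natCast_add]
    have s4 : PySem.List.slice t (some ((0 : Int) + 2 * (kn : Int) * (q : Int) + (kn : Int))) none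
        = (t.drop (2 * kn * q)).drop kn := by
      rw [hE, show ((2 * kn * q : Nat) : Int) + (kn : Int) = ((2 * kn * q + kn : Nat) : Int) by push_cast; ring,
        PySem.List.slice_from_natCast, ← List.drop_drop]
    by_cases hc1 : (M : Int) < (kn : Int) ∧ (0 : Int) < (M : Int)
    · rw [if_pos hc1, if_neg (by omega)]
      rw [s1, s2, ← hfix]
      have htail : (t.drop (2 * kn * q)).length = M := by simp [htlen]; omega
      have hnil : List.drop kn (t.drop (2 * kn * q)) = [] :=
        List.drop_eq_nil_of_le (by rw [htail]; omega)
      rw [List.take_of_length_le (le_of_eq_of_le htail (by omega)), hnil]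
      simp
    · by_cases hc2 : (kn : Int) ≤ (M : Int) ∧ (M : Int) < 2 * (kn : Int)
      · rw [if_neg hc1, if_pos hc2, s1, s3, s4, hfix]
      · have hM0 : M = 0 := by omega
        rw [if_neg hc1, if_neg hc2, ← hfix]
        have htail : t.drop (2 * kn * q) = [] := List.drop_eq_nil_of_le (by omega)
        rw [htail, List.take_of_length_le (le_of_eq (htlen.trans (by omega)))]
        simp

-- B-side: foldl that appends one element per step (in either branch) is a map
lemma foldl_ite_append_singleton {α β : Type} (c : α → Prop) [DecidablePred c] (g1 g2 : α → β) :
    ∀ (xs : List α) (acc : List β),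
    xs.foldl (fun out j => if c j then out ++ [g1 j] else out ++ [g2 j]) acc
      = acc ++ xs.map (fun j => if c j then g1 j else g2 j) := by
  intro xs
  induction xs with
  | nil => intro acc; simp
  | cons x xs ih =>
    intro acc
    by_cases hx : c x
    · simp [hx, ih]
    · simp [hx, ih]

-- B computes the index map bchar over range N
lemma B_eq_map (s : String) (kn : Nat) (hk : 1 ≤ kn) :
    reverse_string_II_alt s (kn : Int)
      = String.mk ((List.range s.toList.length).map (bchar kn s.toList)) := by
  set l := s.toList with hl
  set N := l.length with hN
  have hlen : PySem.Str.len s = (N : Int) := by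
    simp [PySem.Str.len_eq, hN, hl]
  unfold reverse_string_II_alt
  dsimp only
  rw [hlen, ← hl, PySem.List.pyRange_zero_natCast, foldl_ite_append_singleton, List.map_map]
  refine congrArg String.mk (congrArg (List.nil ++ ·) (List.map_congr_left fun j hj => ?_))
  have hjN : j < N := List.mem_range.mp hj
  simp only [Function.comp]
  have h2k : (2 : Int) * (kn : Int) = ((2 * kn : Nat) : Int) := by push_cast; ring
  have hmod : PySem.Int.mod ((j : Nat) : Int) (2 * (kn : Int)) = ((j % (2 * kn) : Nat) : Int) := by
    rw [h2k, PySem.Int.mod_natCast]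
  rw [hmod]
  set r := j % (2 * kn) with hr
  have hrj : r ≤ j := Nat.mod_le _ _
  have hrlt : r < 2 * kn := Nat.mod_lt _ (by omega)
  by_cases hc : r < kn
  · rw [if_pos (by exact_mod_cast hc)]
    unfold bchar
    rw [← hr, if_pos hc]
    set i := j - r with hi
    have hiN : i ≤ j := Nat.sub_le _ _
    have hrNi : r < N - i := by omega
    have hsrc : ((j : Nat) : Int) - ((r : Nat) : Int) + min ((kn : Nat) : Int) ((N : Int) - (((j : Nat) : Int) - ((r : Nat) : Int))) - 1 - ((r : Nat) : Int)
        = ((i + min kn (N - i) - 1 - r : Nat) : Int) := by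
      have e1 : ((j : Nat) : Int) - ((r : Nat) : Int) = ((i : Nat) : Int) := by
        rw [hi]; push_cast [hrj]; ring
      rw [e1, show (N : Int) - ((i : Nat) : Int) = ((N - i : Nat) : Int) by push_cast [le_trans hiN (le_of_lt hjN)]; ring,
        ← Nat.cast_min]
      have hm : r < min kn (N - i) := lt_min hc hrNi
      push_cast [show 1 ≤ i + min kn (N - i) by omega, show r ≤ i + min kn (N - i) - 1 by omega]
      omega
    rw [hsrc, PySem.List.pyGetD_natCast]
  · rw [if_neg (by exact_mod_cast hc)]
    unfold bchar
    rw [← hr, if_neg hc, PySem.List.pyGetD_natCast]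

-- blocks agrees with the index map
lemma blocks_eq_map (kn : Nat) (hk : 1 ≤ kn) : ∀ (q : Nat) (l : List Char),
    2 * kn * q ≤ l.length → l.length < 2 * kn * q + 2 * kn →
    blocks kn q l = (List.range l.length).map (bchar kn l) := by
  intro q
  induction q with
  | zero =>
    intro l hlo hhi
    simp only [Nat.mul_zero, Nat.zero_add] at hhi
    apply List.ext_getElem
    · simp [blocks]; omega
    · intro j h1 h2
      have hjl : j < l.length := by simpa using h2
      simp only [blocks] at h1 ⊢
      rw [List.getElem_map, List.getElem_range]
      unfold bchar
      have hr : j % (2 * kn) = j := Nat.mod_eq_of_lt (by omega)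
      simp only [hr]
      by_cases hc : j < kn
      · rw [if_pos hc]
        have hmin : j < min kn l.length := lt_min hc hjl
        rw [List.getElem_append_left (by simpa using hmin)]
        rw [List.getElem_reverse]
        rw [List.getElem_take]
        have : l.getD (j - j + min kn (l.length - (j - j)) - 1 - j) ' '
            = l.getD (min kn l.length - 1 - j) ' ' := by
          congr 1
          omega
        rw [this, List.getD_eq_getElem l ' ' (by omega)]
        congr 1
        simp
        try omega
      · rw [if_neg hc]
        have hknj : kn ≤ j := le_of_not_gt hc
        have hmin : min kn l.length = kn := by omega
        rw [List.getElem_append_right (by simpa using (by omega : min kn l.length ≤ j))]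
        rw [List.getElem_drop, List.getD_eq_getElem l ' ' hjl]
        congr 1
        simp
        omega
  | succ q ih =>
    intro l hlo hhi
    have hql : 2 * kn * (q + 1) = 2 * kn * q + 2 * kn := by ring
    have h2kl : 2 * kn ≤ l.length := by omega
    have hdl : (l.drop (2 * kn)).length = l.length - 2 * kn := by simp
    have hsplit : l.length = 2 * kn + (l.length - 2 * kn) := by omega
    rw [show blocks kn (q + 1) l
        = ((l.take kn).reverse ++ (l.drop kn).take kn) ++ blocks kn q (l.drop (2 * kn)) by
      simp [blocks, List.append_assoc]]
    rw [ih (l.drop (2 * kn)) (by simp only [List.length_drop]; omega) (by simp only [List.length_drop]; omega), hdl]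
    conv_rhs => rw [hsplit]
    rw [List.range_add, List.map_append, List.map_map]
    congr 1
    · -- first block: j < 2kn
      apply List.ext_getElem
      · simp; omega
      · intro j h1 h2
        have hj2k : j < 2 * kn := by simpa using h2
        rw [List.getElem_map, List.getElem_range]
        unfold bchar
        have hr : j % (2 * kn) = j := Nat.mod_eq_of_lt hj2k
        simp only [hr]
        by_cases hc : j < kn
        · rw [if_pos hc]
          have hmin : min kn (l.length - (j - j)) = kn := by omega
          rw [List.getElem_append_left (by simp; omega)]
          rw [List.getElem_reverse, List.getElem_take]
          have he : j - j + min kn (l.length - (j - j)) - 1 - j = kn - 1 - j := by omega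
          rw [he, List.getD_eq_getElem l ' ' (by omega)]
          congr 1
          simp
          omega
        · rw [if_neg hc]
          have hknj : kn ≤ j := le_of_not_gt hc
          rw [List.getElem_append_right (by simp; omega)]
          rw [List.getElem_take, List.getElem_drop, List.getD_eq_getElem l ' ' (by omega)]
          congr 1
          simp
          omega
    · -- shifted part: bchar l (2kn + j') = bchar (drop 2kn l) j'
      refine List.map_congr_left fun j' hj' => ?_
      have hj'lt : j' < l.length - 2 * kn := List.mem_range.mp hj'
      simp only [Function.comp]
      unfold bchar
      have hrshift : (2 * kn + j') % (2 * kn) = j' % (2 * kn) := Nat.add_mod_left _ _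
      simp only [hrshift, hdl]
      set r := j' % (2 * kn) with hrdef
      have hrj : r ≤ j' := Nat.mod_le _ _
      by_cases hc : r < kn
      · rw [if_pos hc, if_pos hc]
        have hi : 2 * kn + j' - r = 2 * kn + (j' - r) := by omega
        rw [hi]
        have hlen2 : l.length - (2 * kn + (j' - r)) = l.length - 2 * kn - (j' - r) := by omega
        rw [hlen2]
        have hrlt' : r < l.length - 2 * kn - (j' - r) := by omega
        have hm1 : 1 ≤ min kn (l.length - 2 * kn - (j' - r)) := by omega
        have hsrc : 2 * kn + (j' - r) + min kn (l.length - 2 * kn - (j' - r)) - 1 - r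
            = 2 * kn + (j' - r + min kn (l.length - 2 * kn - (j' - r)) - 1 - r) := by
          have hrm : r < min kn (l.length - 2 * kn - (j' - r)) := lt_min hc hrlt'
          omega
        rw [hsrc]
        have hix : j' - r + min kn (l.length - 2 * kn - (j' - r)) - 1 - r < l.length - 2 * kn := by
          have hrm : r < min kn (l.length - 2 * kn - (j' - r)) := lt_min hc hrlt'
          omega
        rw [List.getD_eq_getElem l ' ' (by omega),
          List.getD_eq_getElem (l.drop (2 * kn)) ' ' (by simpa using (by omega : j' - r + min kn (l.length - 2 * kn - (j' - r)) - 1 - r < (l.drop (2*kn)).length))]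
        rw [List.getElem_drop]
      · rw [if_neg hc, if_neg hc]
        rw [List.getD_eq_getElem l ' ' (by omega),
          List.getD_eq_getElem (l.drop (2 * kn)) ' ' (by simpa using (by omega : j' < (l.drop (2*kn)).length))]
        rw [List.getElem_drop]

-- B computes the same blocks
lemma B_eq_blocks (s : String) (kn : Nat) (hk : 1 ≤ kn) :
    reverse_string_II_alt s (kn : Int)
      = String.mk (blocks kn (s.toList.length / (2 * kn)) s.toList) := by
  have h1 : 2 * kn * (s.toList.length / (2 * kn)) + s.toList.length % (2 * kn) = s.toList.length :=
    Nat.div_add_mod _ _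
  have h2 : s.toList.length % (2 * kn) < 2 * kn := Nat.mod_lt _ (by omega)
  rw [B_eq_map s kn hk,
    blocks_eq_map kn hk (s.toList.length / (2 * kn)) s.toList (by omega) (by omega)]

-- ===== VERDICT (by name: the statement is the Claim_ definition above) =====
theorem reverse_string_II_spec : Claim_equal_reverse_string_II := by
  intro s k _ hk
  unfold Spec_reverse_string_II
  obtain ⟨kn, rfl⟩ : ∃ m : Nat, k = (m : Int) := ⟨k.toNat, (Int.toNat_of_nonneg (by exact le_trans zero_le_one hk)).symm⟩
  have hkn : 1 ≤ kn := by
    simp only [Pre_reverse_string_II] at hk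
    exact_mod_cast hk
  rw [A_eq_blocks s kn hkn, B_eq_blocks s kn hkn]
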